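-- pv_equiv track=rewrite | github.com/martindavidenco/IntProg | analisis_teorico.py | busqueda_binaria_con_contador
-- ===== SOURCE A (Python) =====
-- def busqueda_binaria_con_contador(lista, objetivo):
--     """
--     Busca un elemento en una lista ordenada y cuenta las comparaciones.
--     """
--     comparaciones = 0
--     inicio, fin = 0, len(lista) - 1
--     while inicio <= fin:
--         comparaciones += 1 # Cada vez que entra al bucle, hace una comparación
--         medio = (inicio + fin) // 2
--         if lista[medio] == objetivo:
--             return (medio, comparaciones)
--         elif lista[medio] < objetivo:
--             inicio = medio + 1
--         else:
--             fin = medio - 1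
--     return (-1, comparaciones)
-- ===== SOURCE B (Python) =====
-- def busqueda_binaria_con_contador(lista, objetivo):
--     """Recursive divide-and-conquer on list slices, carrying the offset and the count."""
--     def buscar(sub, offset, comparaciones):
--         if not sub:
--             return (-1, comparaciones)
--         comparaciones += 1
--         m = (len(sub) - 1) // 2
--         if sub[m] == objetivo:
--             return (offset + m, comparaciones)
--         if sub[m] < objetivo:
--             return buscar(sub[m + 1:], offset + m + 1, comparaciones)
--         return buscar(sub[:m], offset, comparaciones)
--     return buscar(lista, 0, 0)
-- ===== Notes on version B (the rewrite author's own statement) =====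
-- stated objective: alternative
-- what changed: Replaces the iterative while-loop over (inicio, fin) index bounds with a recursive divide-and-conquer helper that searches actual list slices, carrying an offset and the comparison count.
import Mathlib
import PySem

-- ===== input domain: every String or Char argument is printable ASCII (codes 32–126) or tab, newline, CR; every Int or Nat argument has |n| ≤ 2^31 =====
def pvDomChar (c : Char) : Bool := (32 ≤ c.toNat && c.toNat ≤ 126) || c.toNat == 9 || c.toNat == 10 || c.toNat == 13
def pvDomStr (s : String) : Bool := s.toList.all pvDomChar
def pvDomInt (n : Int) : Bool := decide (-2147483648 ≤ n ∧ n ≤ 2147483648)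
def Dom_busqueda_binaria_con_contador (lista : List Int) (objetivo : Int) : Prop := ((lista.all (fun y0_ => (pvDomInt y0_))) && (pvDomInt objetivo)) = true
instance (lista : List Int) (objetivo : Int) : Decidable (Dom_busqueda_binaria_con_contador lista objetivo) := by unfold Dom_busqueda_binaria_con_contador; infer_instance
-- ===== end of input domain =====

-- B re-implements A's iterative binary search as recursive divide-and-conquer on list
-- slices (alternative decomposition, same comparison count); return values proved equal.

-- ===== PORT A =====
-- the while-loop of A, state (inicio, fin, comparaciones)
def pvA_loop (lista : List Int) (objetivo inicio fin comparaciones : Int) : Int × Int :=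
  if h : inicio ≤ fin then
    let comparaciones := comparaciones + 1
    let medio := PySem.Int.floordiv (inicio + fin) 2
    if PySem.List.pyGetD lista medio 0 = objetivo then (medio, comparaciones)
    else if PySem.List.pyGetD lista medio 0 < objetivo then
      pvA_loop lista objetivo (medio + 1) fin comparaciones
    else
      pvA_loop lista objetivo inicio (medio - 1) comparaciones
  else (-1, comparaciones)
termination_by (fin + 1 - inicio).toNat
decreasing_by
  · have := PySem.Int.floordiv_two_mid_bounds h; omega
  · have := PySem.Int.floordiv_two_mid_bounds h; omega

def busqueda_binaria_con_contador (lista : List Int) (objetivo : Int) : Int × Int :=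
  pvA_loop lista objetivo 0 ((lista.length : Int) - 1) 0

-- ===== PORT B =====
-- B's recursive helper: searches the slice `sub`, `offset` maps back to original indices
def pvB_buscar (objetivo : Int) (sub : List Int) (offset comparaciones : Int) : Int × Int :=
  if h : sub = [] then (-1, comparaciones)
  else
    let comparaciones := comparaciones + 1
    let m := PySem.Int.floordiv ((sub.length : Int) - 1) 2
    if PySem.List.pyGetD sub m 0 = objetivo then (offset + m, comparaciones)
    else if PySem.List.pyGetD sub m 0 < objetivo then
      pvB_buscar objetivo (PySem.List.slice sub (some (m + 1)) none) (offset + m + 1) comparaciones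
    else
      pvB_buscar objetivo (PySem.List.slice sub none (some m)) offset comparaciones
termination_by sub.length
decreasing_by
  · have hlen : 1 ≤ (sub.length : Int) := by
      have := List.length_pos_iff.mpr h; exact_mod_cast this
    have hm := PySem.Int.floordiv_two_mid_bounds (lo := 0) (hi := (sub.length : Int) - 1) (by omega)
    simp only [zero_add] at hm
    rw [PySem.List.slice_from sub (a := PySem.Int.floordiv ((sub.length : Int) - 1) 2 + 1) (by omega)]
    simp only [List.length_drop]
    omega
  · have hlen : 1 ≤ (sub.length : Int) := by
      have := List.length_pos_iff.mpr h; exact_mod_cast this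
    have hm := PySem.Int.floordiv_two_mid_bounds (lo := 0) (hi := (sub.length : Int) - 1) (by omega)
    simp only [zero_add] at hm
    rw [PySem.List.slice_to sub (b := PySem.Int.floordiv ((sub.length : Int) - 1) 2) (by omega)]
    simp only [List.length_take]
    omega

def busqueda_binaria_con_contador_alt (lista : List Int) (objetivo : Int) : Int × Int :=
  pvB_buscar objetivo lista 0 0

-- ===== PRECONDITION & SPEC =====
def Spec_busqueda_binaria_con_contador (lista : List Int) (objetivo : Int) (out : Int × Int) : Prop := out = busqueda_binaria_con_contador_alt lista objetivo
instance (lista : List Int) (objetivo : Int) (out : Int × Int) : Decidable (Spec_busqueda_binaria_con_contador lista objetivo out) := by unfold Spec_busqueda_binaria_con_contador; infer_instance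

-- ===== CLAIM (what is proved, stated in full; the proofs are below) =====
def Claim_equal_busqueda_binaria_con_contador : Prop := ∀ (lista : List Int) (objetivo : Int), Dom_busqueda_binaria_con_contador lista objetivo → Spec_busqueda_binaria_con_contador lista objetivo (busqueda_binaria_con_contador lista objetivo)

-- ===== LEMMAS AND PROOFS =====

-- midpoint shift: (a + b) // 2 = a + (b - a) // 2
lemma pv_floordiv_shift (a b : Int) :
    PySem.Int.floordiv (a + b) 2 = a + PySem.Int.floordiv (b - a) 2 := by
  have h1 := PySem.Int.floordiv_mul_add_mod (b - a) 2
  have h2 := PySem.Int.mod_nonneg (b - a) (b := 2) (by omega)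
  have h3 := PySem.Int.mod_lt (b - a) (b := 2) (by omega)
  have := (PySem.Int.floordiv_eq_iff_of_pos (a := a + b) (b := 2)
      (q := a + PySem.Int.floordiv (b - a) 2) (by omega)).mpr (by omega)
  omega

-- main invariant: A's loop on bounds [inicio, fin] equals B's recursion on the
-- corresponding slice with offset inicio, for any comparison count.
lemma pv_main (lista : List Int) (objetivo : Int) :
    ∀ n (inicio fin comp : Int), 0 ≤ inicio → fin < (lista.length : Int) →
    (fin + 1 - inicio).toNat = n →
    pvA_loop lista objetivo inicio fin comp =
      pvB_buscar objetivo ((lista.drop inicio.toNat).take (fin + 1 - inicio).toNat) inicio comp := by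
  intro n
  induction n using Nat.strong_induction_on with
  | _ n ih =>
    intro inicio fin comp h0 hfin hn
    by_cases hle : inicio ≤ fin
    · -- nonempty interval
      have hlen : ((lista.drop inicio.toNat).take (fin + 1 - inicio).toNat).length
          = (fin + 1 - inicio).toNat := by
        simp only [List.length_take, List.length_drop]; omega
      have hne : (lista.drop inicio.toNat).take (fin + 1 - inicio).toNat ≠ [] := by
        intro hcontra
        have := congrArg List.length hcontra
        simp [hlen] at this; omega
      rw [pvA_loop, pvB_buscar]
      simp only [dif_pos hle, dif_neg hne]
      have hmid := PySem.Int.floordiv_two_mid_bounds (lo := inicio) (hi := fin) hle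
      set medio := PySem.Int.floordiv (inicio + fin) 2 with hmedio
      have hmB : PySem.Int.floordiv ((((lista.drop inicio.toNat).take (fin + 1 - inicio).toNat).length : Int) - 1) 2
          = medio - inicio := by
        rw [hlen, hmedio]
        have : ((((fin + 1 - inicio).toNat) : Int)) - 1 = fin - inicio := by omega
        rw [this, pv_floordiv_shift inicio fin]; omega
      rw [hmB]
      -- the probed element agrees
      have hget : PySem.List.pyGetD ((lista.drop inicio.toNat).take (fin + 1 - inicio).toNat) (medio - inicio) 0
          = PySem.List.pyGetD lista medio 0 := by
        rw [PySem.List.pyGetD_eq_getElem _ _ (by omega) (by rw [hlen]; omega),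
            PySem.List.pyGetD_eq_getElem _ _ (by omega) (by omega)]
        rw [List.getElem_take, List.getElem_drop]
        congr 1
        omega
      rw [hget]
      by_cases heq : PySem.List.pyGetD lista medio 0 = objetivo
      · simp only [if_pos heq]
        simp only [Prod.mk.injEq]
        refine ⟨by omega, ?_⟩
        trivial
      · simp only [if_neg heq]
        by_cases hlt : PySem.List.pyGetD lista medio 0 < objetivo
        · simp only [if_pos hlt]
          -- right half
          have hslice : PySem.List.slice ((lista.drop inicio.toNat).take (fin + 1 - inicio).toNat)
              (some (medio - inicio + 1)) none
              = (lista.drop (medio + 1).toNat).take (fin + 1 - (medio + 1)).toNat := by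
            rw [PySem.List.slice_from _ (a := medio - inicio + 1) (by omega)]
            rw [List.drop_take, List.drop_drop]
            congr 1
            · omega
            · congr 1
              omega
          rw [hslice]
          have hrec := ih (fin + 1 - (medio + 1)).toNat (by omega) (medio + 1) fin (comp + 1)
            (by omega) hfin rfl
          rw [hrec]
          congr 1
          omega
        · simp only [if_neg hlt]
          -- left half
          have hslice : PySem.List.slice ((lista.drop inicio.toNat).take (fin + 1 - inicio).toNat)
              none (some (medio - inicio))
              = (lista.drop inicio.toNat).take ((medio - 1) + 1 - inicio).toNat := by
            rw [PySem.List.slice_to _ (b := medio - inicio) (by omega)]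
            rw [List.take_take]
            congr 1
            omega
          rw [hslice]
          exact ih ((medio - 1) + 1 - inicio).toNat (by omega) inicio (medio - 1) (comp + 1)
            (by omega) (by omega) rfl
    · -- empty interval: both stop
      have hemp : (lista.drop inicio.toNat).take (fin + 1 - inicio).toNat = [] := by
        have : (fin + 1 - inicio).toNat = 0 := by omega
        simp [this]
      rw [pvA_loop, pvB_buscar]
      simp [hle, hemp]

-- ===== VERDICT (by name: the statement is the Claim_ definition above) =====
theorem busqueda_binaria_con_contador_spec : Claim_equal_busqueda_binaria_con_contador := by
  intro lista objetivo _
  unfold Spec_busqueda_binaria_con_contador busqueda_binaria_con_contador busqueda_binaria_con_contador_alt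
  have h := pv_main lista objetivo ((((lista.length : Int) - 1) + 1 - 0).toNat) 0
    ((lista.length : Int) - 1) 0 (by omega) (by omega) rfl
  rw [h]
  congr 1
  simp
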